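-- pv_equiv track=rewrite | github.com/haanh764/Floorplanning | SlicingTree.py | operatorGeneration
-- ===== SOURCE A (Python) =====
-- operator = ["-", "|"]
--
-- def operatorGeneration(nbOperator):
-- 		listOperator = []
-- 		listOperatorReverse = []
-- 		listOperatorPerm = []
-- 		for x in range (0, nbOperator):
-- 				listOperator.append(operator[x%2])
-- 				listOperatorReverse.append(operator[(x+1)%2])
-- 		listOperatorPerm.append(listOperator)
-- 		listOperatorPerm.append(listOperatorReverse)
--
-- 		return listOperatorPerm
-- ===== SOURCE B (Python) =====
-- def operatorGeneration(nbOperator):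
--     k = (nbOperator + 1) // 2
--     listOperator = (["-", "|"] * k)[:nbOperator]
--     listOperatorReverse = (["|", "-"] * k)[:nbOperator]
--     listOperatorPerm = [listOperator, listOperatorReverse]
--     return listOperatorPerm
-- ===== Notes on version B (the rewrite author's own statement) =====
-- stated objective: idiomatic
-- what changed: Replaces the per-element index loop computing operator[x%2] with a closed-form tile-and-truncate construction: repeat the 2-element period (n+1)//2 times and slice to length n.
import Mathlib
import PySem

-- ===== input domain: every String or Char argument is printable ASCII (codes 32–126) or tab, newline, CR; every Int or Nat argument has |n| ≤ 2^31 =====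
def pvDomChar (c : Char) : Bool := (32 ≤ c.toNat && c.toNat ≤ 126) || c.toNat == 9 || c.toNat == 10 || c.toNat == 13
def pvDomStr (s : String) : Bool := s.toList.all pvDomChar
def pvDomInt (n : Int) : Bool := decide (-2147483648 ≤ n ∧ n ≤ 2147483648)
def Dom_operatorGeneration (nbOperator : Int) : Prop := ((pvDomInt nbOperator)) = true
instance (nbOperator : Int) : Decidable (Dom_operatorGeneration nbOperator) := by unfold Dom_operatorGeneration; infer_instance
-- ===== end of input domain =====

-- B replaces A's per-element index loop (operator[x%2] for each x) by tiling the
-- 2-element period (n+1)//2 times and slicing to length n (idiomatic, same cost).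

-- ===== PORT A =====
-- module-level constant 'operator'
def pvOperatorList : List String := ["-", "|"]

-- literal port of A: one pass over range(0, n) appending operator[x%2] / operator[(x+1)%2]
def operatorGeneration (nbOperator : Int) : List (List String) :=
  let st :=
    (PySem.List.pyRange 0 nbOperator 1).foldl
      (fun (st : List String × List String) x =>
        (st.1 ++ [PySem.List.pyGetD pvOperatorList (PySem.Int.mod x 2) ""],
         st.2 ++ [PySem.List.pyGetD pvOperatorList (PySem.Int.mod (x + 1) 2) ""]))
      ([], [])
  [st.1, st.2]

-- ===== PORT B =====
-- literal port of Source B: tile the period k = (n+1)//2 times, then slice [:n]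
def operatorGeneration_alt (nbOperator : Int) : List (List String) :=
  let k := PySem.Int.floordiv (nbOperator + 1) 2
  let listOperator :=
    PySem.List.slice ((List.replicate k.toNat ["-", "|"]).flatten) none (some nbOperator)
  let listOperatorReverse :=
    PySem.List.slice ((List.replicate k.toNat ["|", "-"]).flatten) none (some nbOperator)
  [listOperator, listOperatorReverse]

-- ===== PRECONDITION & SPEC =====
def Spec_operatorGeneration (nbOperator : Int) (out : List (List String)) : Prop := out = operatorGeneration_alt nbOperator
instance (nbOperator : Int) (out : List (List String)) : Decidable (Spec_operatorGeneration nbOperator out) := by unfold Spec_operatorGeneration; infer_instance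

-- ===== CLAIM (what is proved, stated in full; the proofs are below) =====
def Claim_equal_operatorGeneration : Prop := ∀ (nbOperator : Int), Dom_operatorGeneration nbOperator → Spec_operatorGeneration nbOperator (operatorGeneration nbOperator)

-- ===== LEMMAS AND PROOFS =====

-- closed form used on both sides: element i of the first list / second list
def pvF (i : Nat) : String := if i % 2 = 0 then "-" else "|"
def pvG (i : Nat) : String := if i % 2 = 0 then "|" else "-"

theorem pv_flatten_repl_f (j : Nat) :
    (List.replicate j (["-", "|"] : List String)).flatten = (List.range (2 * j)).map pvF := by
  induction j with
  | zero => simp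
  | succ j ih =>
    rw [List.replicate_succ', List.flatten_append, ih]
    have : 2 * (j + 1) = (2 * j) + 1 + 1 := by ring
    rw [this, List.range_succ, List.range_succ, List.map_append, List.map_append]
    simp [pvF, Nat.add_mod, Nat.mul_mod_right]

theorem pv_flatten_repl_g (j : Nat) :
    (List.replicate j (["|", "-"] : List String)).flatten = (List.range (2 * j)).map pvG := by
  induction j with
  | zero => simp
  | succ j ih =>
    rw [List.replicate_succ', List.flatten_append, ih]
    have : 2 * (j + 1) = (2 * j) + 1 + 1 := by ring
    rw [this, List.range_succ, List.range_succ, List.map_append, List.map_append]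
    simp [pvG, Nat.add_mod, Nat.mul_mod_right]

-- A's loop state after processing range(0, m)
theorem pv_loopA (m : Nat) :
    (PySem.List.pyRange 0 (m : Int) 1).foldl
      (fun (st : List String × List String) x =>
        (st.1 ++ [PySem.List.pyGetD pvOperatorList (PySem.Int.mod x 2) ""],
         st.2 ++ [PySem.List.pyGetD pvOperatorList (PySem.Int.mod (x + 1) 2) ""]))
      ([], [])
    = ((List.range m).map pvF, (List.range m).map pvG) := by
  induction m with
  | zero => simp [PySem.List.pyRange_one_eq_nil]
  | succ m ih =>
    have hcast : ((m : Int) + 1) = ((m + 1 : Nat) : Int) := by push_cast; ring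
    rw [← hcast, PySem.List.pyRange_one_succ_right (by positivity),
        List.foldl_append, ih, List.range_succ, List.map_append, List.map_append]
    have h1 : PySem.Int.mod (m : Int) 2 = ((m % 2 : Nat) : Int) := by
      exact_mod_cast PySem.Int.mod_natCast m 2
    have h2 : PySem.Int.mod ((m : Int) + 1) 2 = (((m + 1) % 2 : Nat) : Int) := by
      rw [hcast]; exact_mod_cast PySem.Int.mod_natCast (m + 1) 2
    simp only [List.foldl_cons, List.foldl_nil, h1, h2, PySem.List.pyGetD_natCast]
    rcases Nat.even_or_odd m with he | ho
    · have hm : m % 2 = 0 := Nat.even_iff.mp he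
      have hm1 : (m + 1) % 2 = 1 := by omega
      simp [pvF, pvG, hm, hm1, pvOperatorList]
    · have hm : m % 2 = 1 := Nat.odd_iff.mp ho
      have hm1 : (m + 1) % 2 = 0 := by omega
      simp [pvF, pvG, hm, hm1, pvOperatorList]

theorem pv_altB (n : Int) (hn : 0 ≤ n) :
    operatorGeneration_alt n = [(List.range n.toNat).map pvF, (List.range n.toNat).map pvG] := by
  simp only [operatorGeneration_alt]
  have hk : (PySem.Int.floordiv (n + 1) 2).toNat = (n.toNat + 1) / 2 := by
    rw [PySem.Int.floordiv_eq_ediv_of_pos (by omega)]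
    omega
  rw [hk, pv_flatten_repl_f, pv_flatten_repl_g,
      PySem.List.slice_to _ hn, PySem.List.slice_to _ hn,
      ← List.map_take, ← List.map_take]
  have hmin : min n.toNat (2 * ((n.toNat + 1) / 2)) = n.toNat := by omega
  simp [List.take_range, hmin]

theorem pv_A_nonneg (n : Int) (hn : 0 ≤ n) :
    operatorGeneration n = [(List.range n.toNat).map pvF, (List.range n.toNat).map pvG] := by
  have hc : n = ((n.toNat : Nat) : Int) := by omega
  rw [hc]
  simp only [operatorGeneration]
  rw [pv_loopA]
  simp [max_eq_left hn]

theorem pv_neg (n : Int) (hn : n < 0) :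
    operatorGeneration n = operatorGeneration_alt n := by
  have h1 : PySem.List.pyRange 0 n 1 = [] := PySem.List.pyRange_one_eq_nil (by omega)
  have h2 : (PySem.Int.floordiv (n + 1) 2).toNat = 0 := by
    have : PySem.Int.floordiv (n + 1) 2 ≤ 0 := by
      rw [PySem.Int.floordiv_eq_ediv_of_pos (by omega)]; omega
    omega
  have h2' : ((n + 1) / 2).toNat = 0 := by omega
  simp [operatorGeneration, operatorGeneration_alt, h1, h2', PySem.List.slice]

-- ===== VERDICT (by name: the statement is the Claim_ definition above) =====
theorem operatorGeneration_spec : Claim_equal_operatorGeneration := by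
  intro n _
  unfold Spec_operatorGeneration
  rcases lt_or_ge n 0 with h | h
  · exact pv_neg n h
  · rw [pv_A_nonneg n h, pv_altB n h]
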